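-- pv_equiv track=rewrite | github.com/KangHongZhao/speech-signal-processing | lib/DSP_Tools.py | findFirstPeak
-- ===== SOURCE A (Python) =====
-- def findFirstPeak(p):
--     i = 0
--     while i < len(p):
--         if p[i] == 0:
--             break
--         i += 1
--     while i < len(p):
--         if p[i] == 1:
--             break
--         i += 1
--     if i == len(p):
--         i = 0
--
--     return i
-- ===== SOURCE B (Python) =====
-- def findFirstPeak(p):
--     # Declarative: the answer is the first index i whose value is 1 and that
--     # has a 0 somewhere strictly before it; if no such index exists, 0.
--     return next((i for i, x in enumerate(p) if x == 1 and 0 in p[:i]), 0)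
-- ===== Notes on version B (the rewrite author's own statement) =====
-- stated objective: alternative
-- what changed: Replaced A's two sequential stateful while-scans plus a fallback length check by a single declarative search for the first index whose value is 1 and whose prefix contains a 0 (next(...) over a generator, default 0).
import Mathlib
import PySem

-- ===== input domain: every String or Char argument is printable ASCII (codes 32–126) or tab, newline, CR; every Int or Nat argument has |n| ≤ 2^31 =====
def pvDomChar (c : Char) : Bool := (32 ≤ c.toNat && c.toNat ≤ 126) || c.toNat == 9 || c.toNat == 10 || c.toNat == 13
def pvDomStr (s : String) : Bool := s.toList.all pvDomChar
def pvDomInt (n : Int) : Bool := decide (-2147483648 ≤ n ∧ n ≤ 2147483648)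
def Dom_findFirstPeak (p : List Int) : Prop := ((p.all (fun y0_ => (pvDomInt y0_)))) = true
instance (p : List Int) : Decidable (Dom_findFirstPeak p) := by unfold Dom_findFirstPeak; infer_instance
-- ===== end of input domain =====

-- B replaces A's two sequential stateful while-scans by a declarative search for the
-- first index whose value is 1 and whose prefix contains a 0 (alternative decomposition).

-- ===== PORT A =====
-- first while-loop: advance i until p[i] == 0 or i = len
def findFirstPeakLoop1 (p : List Int) (i : Nat) : Nat :=
  if h : i < p.length then
    if p[i] = 0 then i else findFirstPeakLoop1 p (i + 1)
  else i
termination_by p.length - i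

-- second while-loop: advance i until p[i] == 1 or i = len
def findFirstPeakLoop2 (p : List Int) (i : Nat) : Nat :=
  if h : i < p.length then
    if p[i] = 1 then i else findFirstPeakLoop2 p (i + 1)
  else i
termination_by p.length - i

def findFirstPeak (p : List Int) : Int :=
  let i := findFirstPeakLoop1 p 0
  let i := findFirstPeakLoop2 p i
  if i = p.length then (0 : Int) else (i : Int)

-- ===== PORT B =====
-- the generator in Source B: scan enumerate(p) for the first (i, x) with x == 1 and 0 in p[:i]
def findFirstPeakAltLoop (p : List Int) : List Int → Nat → Int
  | [], _ => 0
  | x :: xs, i =>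
    if x = 1 ∧ 0 ∈ p.take i then (i : Int) else findFirstPeakAltLoop p xs (i + 1)

def findFirstPeak_alt (p : List Int) : Int :=
  findFirstPeakAltLoop p p 0

-- ===== PRECONDITION & SPEC =====
def Spec_findFirstPeak (p : List Int) (out : Int) : Prop := out = findFirstPeak_alt p
instance (p : List Int) (out : Int) : Decidable (Spec_findFirstPeak p out) := by unfold Spec_findFirstPeak; infer_instance

-- ===== CLAIM (what is proved, stated in full; the proofs are below) =====
def Claim_equal_findFirstPeak : Prop := ∀ (p : List Int), Dom_findFirstPeak p → Spec_findFirstPeak p (findFirstPeak p)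

-- ===== LEMMAS AND PROOFS =====

theorem drop_cons (p : List Int) (i : Nat) (h : i < p.length) :
    p.drop i = p[i] :: p.drop (i + 1) :=
  List.drop_eq_getElem_cons h

theorem mem_take_succ_of_mem_take (p : List Int) (i : Nat) (hz : (0:Int) ∈ p.take i) :
    (0:Int) ∈ p.take (i + 1) := by
  rw [List.take_add_one]
  exact List.mem_append_left _ hz

-- once the prefix contains a 0, B's scan equals A's second while-loop (with the fallback)
theorem altLoop_after (p : List Int) (i : Nat) (h : i ≤ p.length) (hz : (0:Int) ∈ p.take i) :
    findFirstPeakAltLoop p (p.drop i) i =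
      (if findFirstPeakLoop2 p i = p.length then (0 : Int) else (findFirstPeakLoop2 p i : Int)) := by
  rcases Nat.lt_or_ge i p.length with hlt | hge
  · rw [drop_cons p i hlt]
    unfold findFirstPeakAltLoop
    rw [findFirstPeakLoop2]
    simp only [hlt, dif_pos]
    by_cases h1 : p[i] = 1
    · have : ¬ (i = p.length) := by omega
      simp [h1, hz, this]
    · rw [if_neg (by simp [h1]), if_neg h1]
      exact altLoop_after p (i + 1) (by omega) (mem_take_succ_of_mem_take p i hz)
  · have hi : i = p.length := by omega
    rw [List.drop_eq_nil_of_le (by omega)]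
    unfold findFirstPeakAltLoop
    rw [findFirstPeakLoop2]
    simp [hi]
termination_by p.length - i

-- while the prefix contains no 0, B's scan equals the whole of A starting the first scan at i
theorem altLoop_before (p : List Int) (i : Nat) (h : i ≤ p.length) (hz : (0:Int) ∉ p.take i) :
    findFirstPeakAltLoop p (p.drop i) i =
      (if findFirstPeakLoop2 p (findFirstPeakLoop1 p i) = p.length then (0 : Int)
       else (findFirstPeakLoop2 p (findFirstPeakLoop1 p i) : Int)) := by
  rcases Nat.lt_or_ge i p.length with hlt | hge
  · rw [drop_cons p i hlt]
    unfold findFirstPeakAltLoop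
    rw [findFirstPeakLoop1]
    simp only [hlt, dif_pos]
    by_cases h0 : p[i] = 0
    · rw [if_pos h0]
      -- B skips index i (0 ≠ 1 there is not needed: 0 ∉ p.take i kills the condition);
      -- A's second loop also steps past i since p[i] = 0 ≠ 1
      have hcond : ¬ (p[i] = 1 ∧ (0:Int) ∈ p.take i) := by
        intro ⟨_, hmem⟩; exact hz hmem
      rw [if_neg hcond]
      have step : findFirstPeakLoop2 p i = findFirstPeakLoop2 p (i + 1) := by
        rw [findFirstPeakLoop2]
        have h1 : ¬ (p[i] = 1) := by rw [h0]; decide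
        simp [hlt, h1]
      rw [step]
      have hz' : (0:Int) ∈ p.take (i + 1) := by
        rw [List.take_add_one]
        refine List.mem_append_right _ ?_
        simp [List.getElem?_eq_getElem hlt, h0]
      exact altLoop_after p (i + 1) (by omega) hz'
    · rw [if_neg h0]
      have hcond : ¬ (p[i] = 1 ∧ (0:Int) ∈ p.take i) := by
        intro ⟨_, hmem⟩; exact hz hmem
      rw [if_neg hcond]
      have hz' : (0:Int) ∉ p.take (i + 1) := by
        rw [List.take_add_one]
        intro hmem
        rcases List.mem_append.mp hmem with hmem | hmem
        · exact hz hmem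
        · simp [List.getElem?_eq_getElem hlt] at hmem
          exact h0 hmem.symm
      exact altLoop_before p (i + 1) (by omega) hz'
  · have hi : i = p.length := by omega
    rw [List.drop_eq_nil_of_le (by omega)]
    unfold findFirstPeakAltLoop
    rw [findFirstPeakLoop1]
    have hnl : ¬ (i < p.length) := by omega
    rw [dif_neg hnl]
    rw [findFirstPeakLoop2, dif_neg hnl]
    simp [hi]
termination_by p.length - i

-- ===== VERDICT (by name: the statement is the Claim_ definition above) =====
theorem findFirstPeak_spec : Claim_equal_findFirstPeak := by
  intro p _
  unfold Spec_findFirstPeak findFirstPeak findFirstPeak_alt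
  have := altLoop_before p 0 (Nat.zero_le _) (by simp)
  simp only [List.drop_zero] at this
  rw [this]
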